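-- pv_equiv track=rewrite | github.com/tda-juanes/tp3 | lib/backtracking.py | hitting_set_k
-- ===== SOURCE A (Python) =====
-- def hitting_set_k(subsets, s_i, sol, k):
--     if s_i == len(subsets):
--         return sol
--
--     for elem in subsets[s_i]:
--         if elem in sol:
--             return hitting_set_k(subsets, s_i + 1, sol, k)
--     if len(sol) >= k:
--         return
--
--     # pruebo con todos los elementos del set actual
--     for elem in subsets[s_i]:
--         sol.append(elem)
--         new_sol = hitting_set_k(subsets, s_i + 1, sol, k)
--         if new_sol is not None:
--             return new_sol
--         sol.pop()
-- ===== SOURCE B (Python) =====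
-- def hitting_set_k(subsets, s_i, sol, k):
--     n = len(subsets)
--     stack = []  # frames: (index, remaining elements still to try there)
--     i = s_i
--     while True:
--         # descend: advance through covered subsets, open a frame otherwise
--         blocked = False
--         while i != n:
--             subset = subsets[i]
--             if any(e in sol for e in subset):
--                 i += 1
--             elif len(sol) < k and subset:
--                 sol.append(subset[0])
--                 stack.append((i, subset[1:]))
--                 i += 1
--             else:
--                 blocked = True
--                 break
--         if not blocked:
--             return sol
--         # backtrack: pop frames until one still has an alternative to try
--         while stack:
--             j, rest = stack.pop()
--             sol.pop()
--             if rest: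
--                 sol.append(rest[0])
--                 stack.append((j, rest[1:]))
--                 i = j + 1
--                 break
--         else:
--             return None
-- ===== Notes on version B (the rewrite author's own statement) =====
-- stated objective: alternative
-- what changed: Replaces A's recursive backtracking with an iterative DFS driven by an explicit stack of (index, untried-elements) frames and two loops (descend / backtrack), preserving A's exact trial order and returned solution.
import Mathlib
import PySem

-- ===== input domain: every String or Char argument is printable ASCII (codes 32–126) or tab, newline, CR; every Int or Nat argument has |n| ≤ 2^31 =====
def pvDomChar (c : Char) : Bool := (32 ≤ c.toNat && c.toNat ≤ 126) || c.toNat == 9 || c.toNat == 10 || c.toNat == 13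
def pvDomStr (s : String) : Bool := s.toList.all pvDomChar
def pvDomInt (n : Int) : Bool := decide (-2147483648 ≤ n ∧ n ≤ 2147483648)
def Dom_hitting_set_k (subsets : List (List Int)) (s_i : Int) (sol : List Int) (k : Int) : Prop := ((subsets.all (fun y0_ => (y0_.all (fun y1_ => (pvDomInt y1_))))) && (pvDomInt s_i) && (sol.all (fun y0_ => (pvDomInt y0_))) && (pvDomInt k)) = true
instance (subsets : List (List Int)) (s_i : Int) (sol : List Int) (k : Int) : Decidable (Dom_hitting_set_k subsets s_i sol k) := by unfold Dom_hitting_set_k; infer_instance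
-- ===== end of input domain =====

-- B replaces A's recursive backtracking by an iterative DFS with an explicit frame stack
-- (objective: alternative decomposition). Equivalence is about the RETURN value; both
-- Pythons mutate `sol` identically (append/pop balanced, same final state).


-- ===== PORT A =====
-- Literal transliteration of A's recursion, made structural by a fuel counter that is
-- exactly the recursion-depth bound (len(subsets) - s_i) + 1, so inside Pre_ the fuel
-- never runs out (a totality guard only).  A's first loop returns on the first element
-- already in sol, which is `subset.any (sol.contains ·)` deciding the branch; A's second
-- loop (append/recurse/return-if-some/pop) is `subset.findSome?` of the recursive call.
def goA : Nat → List (List Int) → Int → List Int → Int → Option (List Int)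
  | 0, _, _, _, _ => none
  | f + 1, subsets, s_i, sol, k =>
    if s_i = (subsets.length : Int) then some sol
    else
      match PySem.List.pyGet? subsets s_i with
      | none => none     -- Python raises IndexError here; excluded by Pre_
      | some subset =>
        if subset.any (fun e => sol.contains e) then goA f subsets (s_i + 1) sol k
        else if k ≤ (sol.length : Int) then none
        else subset.findSome? (fun e => goA f subsets (s_i + 1) (sol ++ [e]) k)

def hitting_set_k (subsets : List (List Int)) (s_i : Int) (sol : List Int) (k : Int) : Option (List Int) :=
  goA (((subsets.length : Int) - s_i).toNat + 1) subsets s_i sol k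

-- ===== PORT B =====
-- fuel bound for B's outer loop (termination guard only)
def pvMaxLen (subsets : List (List Int)) : Nat := subsets.foldr (fun s a => max s.length a) 0

def pvF (L : Nat) : Nat → Nat
  | 0 => 1
  | d + 1 => (L + 1) * (pvF L d + 1) + 2

-- B's inner `while stack` loop: pop frames until one still has an alternative to try;
-- returns the resume state (new i, new sol, new stack), or none when the stack is empty
def unwindStep (sol : List Int) : List (Int × List Int) → Option (Int × List Int × List (Int × List Int))
  | [] => none
  | (j, rest) :: st =>
    match rest with
    | [] => unwindStep sol.dropLast st
    | e :: rest' => some (j + 1, sol.dropLast ++ [e], (j, rest') :: st)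

-- B's outer `while True` loop (one fuel per iteration of the descend loop)
def loopB : Nat → List (List Int) → Int → Int → List Int → List (Int × List Int) → Option (List Int)
  | 0, _, _, _, _, _ => none
  | f + 1, subsets, k, i, sol, stack =>
    if i = (subsets.length : Int) then some sol     -- descent not blocked: return sol
    else
      match PySem.List.pyGet? subsets i with
      | none => none     -- Python raises IndexError here; excluded by Pre_
      | some subset =>
        if subset.any (fun e => sol.contains e) then loopB f subsets k (i + 1) sol stack
        else if (sol.length : Int) < k then
          match subset with
          | [] =>          -- blocked on an empty subset: backtrack
            match unwindStep sol stack with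
            | none => none
            | some (i', sol', st') => loopB f subsets k i' sol' st'
          | e :: rest => loopB f subsets k (i + 1) (sol ++ [e]) ((i, rest) :: stack)
        else               -- blocked by len(sol) >= k: backtrack
          match unwindStep sol stack with
          | none => none
          | some (i', sol', st') => loopB f subsets k i' sol' st'

def hitting_set_k_alt (subsets : List (List Int)) (s_i : Int) (sol : List Int) (k : Int) : Option (List Int) :=
  loopB (pvF (pvMaxLen subsets) (((subsets.length : Int) - s_i).toNat) + 1) subsets k s_i sol []

-- ===== PRECONDITION & SPEC =====
-- Pre_ excludes exactly the inputs where Python A raises IndexError (s_i outside [-len(subsets), len(subsets)]);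
-- B raises identically there.
def Pre_hitting_set_k (subsets : List (List Int)) (s_i : Int) (sol : List Int) (k : Int) : Prop :=
  -(subsets.length : Int) ≤ s_i ∧ s_i ≤ (subsets.length : Int)
instance (subsets : List (List Int)) (s_i : Int) (sol : List Int) (k : Int) : Decidable (Pre_hitting_set_k subsets s_i sol k) := by unfold Pre_hitting_set_k; infer_instance

def pvWitness_hitting_set_k : List (List Int) × Int × List Int × Int := ([[1, 2], [2, 3]], 0, [], 1)

def Spec_hitting_set_k (subsets : List (List Int)) (s_i : Int) (sol : List Int) (k : Int) (out : Option (List Int)) : Prop := out = hitting_set_k_alt subsets s_i sol k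
instance (subsets : List (List Int)) (s_i : Int) (sol : List Int) (k : Int) (out : Option (List Int)) : Decidable (Spec_hitting_set_k subsets s_i sol k out) := by unfold Spec_hitting_set_k; infer_instance

-- ===== CLAIM (what is proved, stated in full; the proofs are below) =====
def Claim_equal_hitting_set_k : Prop := ∀ (subsets : List (List Int)) (s_i : Int) (sol : List Int) (k : Int), Dom_hitting_set_k subsets s_i sol k → Pre_hitting_set_k subsets s_i sol k → Spec_hitting_set_k subsets s_i sol k (hitting_set_k subsets s_i sol k)

-- ===== LEMMAS AND PROOFS =====

theorem pv_range_of_pyGet? {α : Type} {xs : List α} {i : Int} {v : α}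
    (h : PySem.List.pyGet? xs i = some v) : -(xs.length : Int) ≤ i ∧ i < (xs.length : Int) := by
  by_contra hc
  have hn : PySem.List.pyGet? xs i = none := by
    rw [PySem.List.pyGet?_eq_none_iff]
    simp only [PySem.Raise.InRange]
    omega
  rw [hn] at h
  cases h

theorem pyGet?_isSome_of_range {α : Type} (xs : List α) (i : Int)
    (h1 : -(xs.length : Int) ≤ i) (h2 : i < (xs.length : Int)) :
    ∃ v, PySem.List.pyGet? xs i = some v := by
  cases hv : PySem.List.pyGet? xs i with
  | some v => exact ⟨v, rfl⟩
  | none =>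
    rw [PySem.List.pyGet?_eq_none_iff] at hv
    exact absurd (by simp only [PySem.Raise.InRange]; omega) hv

theorem pv_len_le_maxLen {subsets : List (List Int)} {s : List Int} :
    s ∈ subsets → s.length ≤ pvMaxLen subsets := by
  induction subsets with
  | nil => intro h; cases h
  | cons x xs ih =>
    intro h
    have hx : pvMaxLen (x :: xs) = max x.length (pvMaxLen xs) := rfl
    rw [List.mem_cons] at h
    rcases h with rfl | h
    · rw [hx]; omega
    · have := ih h; rw [hx]; omega

theorem pvF_pos (L d : Nat) : 1 ≤ pvF L d := by
  cases d with
  | zero => simp [pvF]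
  | succ d => simp only [pvF]; omega

-- proof-side cost of a stack (how much fuel unwinding it and exploring its alternatives needs)
def pvC (subsets : List (List Int)) (stack : List (Int × List Int)) : Nat :=
  stack.foldr (fun f a => f.2.length * (pvF (pvMaxLen subsets) (((subsets.length : Int) - (f.1 + 1)).toNat) + 1) + 1 + a) 0

def StackOK (subsets : List (List Int)) (stack : List (Int × List Int)) : Prop :=
  ∀ p ∈ stack, -(subsets.length : Int) ≤ p.1 ∧ p.1 < (subsets.length : Int)

-- spec-level unwinding of B's stack in terms of A
def Unw (subsets : List (List Int)) (k : Int) (sol : List Int) : List (Int × List Int) → Option (List Int)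
  | [] => none
  | (j, rest) :: st =>
    match rest.findSome? (fun e => hitting_set_k subsets (j + 1) (sol.dropLast ++ [e]) k) with
    | some r => some r
    | none => Unw subsets k sol.dropLast st

-- unfolding A at the end of the subset list
theorem A_len (subsets : List (List Int)) (sol : List Int) (k : Int) :
    hitting_set_k subsets (subsets.length : Int) sol k = some sol := by
  unfold hitting_set_k
  rw [show (((subsets.length : Int) - (subsets.length : Int)).toNat + 1) = 1 by omega]
  simp [goA]

-- one-step unfolding of A inside its domain: the fuel is exactly the depth, so each
-- recursive occurrence is again hitting_set_k
theorem A_step (subsets : List (List Int)) (i : Int) (sol : List Int) (k : Int)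
    (h1 : i ≠ (subsets.length : Int)) (hrng : -(subsets.length : Int) ≤ i ∧ i ≤ (subsets.length : Int)) :
    hitting_set_k subsets i sol k =
      match PySem.List.pyGet? subsets i with
      | none => none
      | some subset =>
        if subset.any (fun e => sol.contains e) then hitting_set_k subsets (i + 1) sol k
        else if k ≤ (sol.length : Int) then none
        else subset.findSome? (fun e => hitting_set_k subsets (i + 1) (sol ++ [e]) k) := by
  unfold hitting_set_k
  rw [show (((subsets.length : Int) - i).toNat + 1) = ((((subsets.length : Int) - (i + 1)).toNat + 1) + 1) by omega]
  rw [goA, if_neg h1]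

-- the simulation invariant: with enough fuel, B's loop computes A's result, else unwinds
-- the stack via A
theorem loopB_eq (subsets : List (List Int)) (k : Int) :
    ∀ (f : Nat) (i : Int) (sol : List Int) (stack : List (Int × List Int)),
      pvF (pvMaxLen subsets) (((subsets.length : Int) - i).toNat) + pvC subsets stack < f →
      (-(subsets.length : Int) ≤ i ∧ i ≤ (subsets.length : Int)) → StackOK subsets stack →
      loopB f subsets k i sol stack =
        (match hitting_set_k subsets i sol k with
         | some r => some r
         | none => Unw subsets k sol stack) := by
  intro f
  induction f with
  | zero => intro i sol stack hf; omega
  | succ f ih =>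
    intro i sol stack hf hrng hst
    by_cases h1 : i = (subsets.length : Int)
    · subst h1
      rw [loopB, if_pos rfl, A_len]
    · obtain ⟨subset, hv⟩ := pyGet?_isSome_of_range subsets i (by omega) (by omega)
      have hr := pv_range_of_pyGet? hv
      have hd : ((subsets.length : Int) - i).toNat = ((subsets.length : Int) - (i + 1)).toNat + 1 := by omega
      set L := pvMaxLen subsets with hL
      set d' := ((subsets.length : Int) - (i + 1)).toNat with hd'
      have hFstep : pvF L (d' + 1) = (L + 1) * (pvF L d' + 1) + 2 := rfl
      have hFgrow : pvF L d' + 1 ≤ (L + 1) * (pvF L d' + 1) :=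
        Nat.le_mul_of_pos_left _ (by omega)
      have hfi : pvF L (d' + 1) + pvC subsets stack < f + 1 := by rw [← hd]; exact hf
      -- the backtrack phase: unwinding any well-formed stack with fuel f computes Unw
      have Hun : ∀ (stack : List (Int × List Int)) (sol : List Int), StackOK subsets stack →
          pvC subsets stack < f →
          (match unwindStep sol stack with
           | none => none
           | some (i', sol', st') => loopB f subsets k i' sol' st') = Unw subsets k sol stack := by
        intro stack
        induction stack with
        | nil => intro sol _ _; rfl
        | cons p st ihs =>
          obtain ⟨j, rest⟩ := p
          intro sol hstC hC
          have hj := hstC (j, rest) List.mem_cons_self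
          have hst' : StackOK subsets st := fun p hp => hstC p (List.mem_cons_of_mem _ hp)
          cases rest with
          | nil =>
            have hC' : pvC subsets st < f := by
              have hone : pvC subsets ((j, ([] : List Int)) :: st) = 1 + pvC subsets st := by
                simp [pvC]
              omega
            show (match unwindStep sol.dropLast st with
                  | none => none
                  | some (i', sol', st') => loopB f subsets k i' sol' st') =
              Unw subsets k sol ((j, ([] : List Int)) :: st)
            rw [ihs sol.dropLast hst' hC']
            simp [Unw]
          | cons e rest' =>
            set Fj := pvF L (((subsets.length : Int) - (j + 1)).toNat) with hFj
            have hCeq : pvC subsets ((j, e :: rest') :: st) =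
                (rest'.length + 1) * (Fj + 1) + 1 + pvC subsets st := by
              simp [pvC, ← hFj, ← hL]
            have hCeq' : pvC subsets ((j, rest') :: st) =
                rest'.length * (Fj + 1) + 1 + pvC subsets st := by
              simp [pvC, ← hFj, ← hL]
            have hmul : (rest'.length + 1) * (Fj + 1) = rest'.length * (Fj + 1) + (Fj + 1) := by ring
            have hbound : Fj + pvC subsets ((j, rest') :: st) < f := by omega
            have hstre : StackOK subsets ((j, rest') :: st) := by
              intro p hp
              rcases List.mem_cons.1 hp with rfl | hp
              · exact hj
              · exact hst' p hp
            show loopB f subsets k (j + 1) (sol.dropLast ++ [e]) ((j, rest') :: st) =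
              Unw subsets k sol ((j, e :: rest') :: st)
            rw [ih (j + 1) (sol.dropLast ++ [e]) ((j, rest') :: st) hbound ⟨by omega, by omega⟩ hstre]
            cases hA : hitting_set_k subsets (j + 1) (sol.dropLast ++ [e]) k with
            | some r => simp [Unw, hA]
            | none => simp [Unw, hA]
      -- case split on A's branches at this index
      rw [A_step subsets i sol k h1 hrng, hv]
      by_cases hany : subset.any (fun e => sol.contains e) = true
      · -- covered: advance
        rw [loopB, if_neg h1, hv]
        simp only [hany, if_true]
        have : pvF L d' + pvC subsets stack < f := by omega
        exact ih (i + 1) sol stack this ⟨by omega, by omega⟩ hst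
      · by_cases hk : (sol.length : Int) < k
        · cases subset with
          | nil =>
            -- blocked on the empty subset
            rw [loopB, if_neg h1, hv]
            simp only [hany, if_false, Bool.false_eq_true, if_pos hk]
            rw [Hun stack sol hst (by have := pvF_pos L (d' + 1); omega)]
            simp
          | cons e rest =>
            -- push e, open frame (i, rest)
            rw [loopB, if_neg h1, hv]
            simp only [hany, if_false, Bool.false_eq_true, if_pos hk]
            have hlen : (e :: rest).length ≤ L :=
              pv_len_le_maxLen (PySem.List.mem_of_pyGet?_eq_some _ hv)
            have hCpush : pvC subsets ((i, rest) :: stack) =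
                rest.length * (pvF L d' + 1) + 1 + pvC subsets stack := by
              simp [pvC, ← hL, ← hd']
            have h2 : (rest.length + 1) * (pvF L d' + 1) ≤ L * (pvF L d' + 1) :=
              Nat.mul_le_mul_right _ (by simpa using hlen)
            have h3 : (rest.length + 1) * (pvF L d' + 1) =
                rest.length * (pvF L d' + 1) + (pvF L d' + 1) := by ring
            have h5 : L * (pvF L d' + 1) ≤ (L + 1) * (pvF L d' + 1) :=
              Nat.mul_le_mul_right _ (by omega)
            have hbound : pvF L d' + pvC subsets ((i, rest) :: stack) < f := by omega
            have hstre : StackOK subsets ((i, rest) :: stack) := by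
              intro p hp
              rcases List.mem_cons.1 hp with rfl | hp
              · exact ⟨by omega, by omega⟩
              · exact hst p hp
            rw [ih (i + 1) (sol ++ [e]) ((i, rest) :: stack) hbound ⟨by omega, by omega⟩ hstre]
            rw [if_neg (show ¬ k ≤ (sol.length : Int) by omega)]
            cases hA : hitting_set_k subsets (i + 1) (sol ++ [e]) k with
            | some r => simp [hA]
            | none => simp [hA, Unw]
        · -- blocked by len(sol) >= k
          rw [loopB, if_neg h1, hv]
          simp only [hany, if_false, Bool.false_eq_true, if_neg hk]
          rw [Hun stack sol hst (by have := pvF_pos L (d' + 1); omega)]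
          rw [if_pos (by omega : k ≤ (sol.length : Int))]

-- ===== VERDICT (by name: the statement is the Claim_ definition above) =====
theorem hitting_set_k_spec : Claim_equal_hitting_set_k := by
  intro subsets s_i sol k _ hpre
  unfold Spec_hitting_set_k hitting_set_k_alt
  have h := loopB_eq subsets k (pvF (pvMaxLen subsets) (((subsets.length : Int) - s_i).toNat) + 1)
    s_i sol [] (by simp [pvC]) ⟨hpre.1, hpre.2⟩ (by intro p hp; cases hp)
  rw [h]
  cases hitting_set_k subsets s_i sol k with
  | some r => rfl
  | none => rfl
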